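-- pv_equiv track=rewrite | github.com/David-Jr/MasseyRamanujan | source/series_generators.py | create_series_from_polynomial
-- ===== SOURCE A (Python) =====
-- def create_series_from_polynomial(poly_a, n):
--     """
--     given a polynomial P(x) as generator return An when A[i] = P(i)
--     :param poly_a:
--     :type poly_a: list
--     :param n: number of values to generate
--     :type n: int
--     :return: series with length of n
--     """
--     a_ = []
--     for i in range(n):
--         a_i = 0
--         pol = 1
--         for j in range(len(poly_a)):
--             a_i += pol * poly_a[j]
--             pol *= i
--         a_.append(a_i)
--     return a_
-- ===== SOURCE B (Python) =====
-- def _horner(poly_a, i):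
--     acc = 0
--     for c in reversed(poly_a):
--         acc = acc * i + c
--     return acc
--
-- def create_series_from_polynomial(poly_a, n):
--     return [_horner(poly_a, i) for i in range(n)]
-- ===== Notes on version B (the rewrite author's own statement) =====
-- stated objective: idiomatic
-- what changed: Each value is computed by Horner's rule folding the coefficients high-to-low with a single accumulator, instead of A's inner loop that maintains a running power of i and sums pol*coeff low-to-high; the output list is built by a comprehension rather than repeated append.
import Mathlib
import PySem

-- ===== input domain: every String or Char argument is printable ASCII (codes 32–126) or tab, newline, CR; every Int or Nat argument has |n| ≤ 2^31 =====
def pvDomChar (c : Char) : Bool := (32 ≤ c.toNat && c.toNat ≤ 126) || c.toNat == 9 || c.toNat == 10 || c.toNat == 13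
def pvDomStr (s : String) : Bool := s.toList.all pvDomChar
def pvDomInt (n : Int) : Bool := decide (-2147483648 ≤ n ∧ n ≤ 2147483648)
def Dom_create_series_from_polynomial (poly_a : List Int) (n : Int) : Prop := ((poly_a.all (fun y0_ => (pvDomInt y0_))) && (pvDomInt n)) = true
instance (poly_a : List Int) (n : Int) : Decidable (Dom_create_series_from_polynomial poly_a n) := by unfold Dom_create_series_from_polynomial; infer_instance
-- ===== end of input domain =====

-- B evaluates each P(i) by Horner's rule over the reversed coefficients instead of A's
-- running-power accumulation; same values, same cost (objective: idiomatic).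

-- ===== PORT A =====
-- inner loop: state (a_i, pol); iterating j over range(len(poly_a)) visiting poly_a[j]
-- in order is transcribed as a fold over poly_a itself.
def create_series_from_polynomial (poly_a : List Int) (n : Int) : List Int :=
  (PySem.List.pyRange 0 n 1).foldl
    (fun a_ i =>
      let st := poly_a.foldl (fun (st : Int × Int) c => (st.1 + st.2 * c, st.2 * i)) (0, 1)
      a_ ++ [st.1])
    []

-- ===== PORT B =====
def pvHorner (poly_a : List Int) (i : Int) : Int :=
  poly_a.reverse.foldl (fun acc c => acc * i + c) 0

def create_series_from_polynomial_alt (poly_a : List Int) (n : Int) : List Int :=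
  (PySem.List.pyRange 0 n 1).map (fun i => pvHorner poly_a i)

-- ===== PRECONDITION & SPEC =====
def Spec_create_series_from_polynomial (poly_a : List Int) (n : Int) (out : List Int) : Prop := out = create_series_from_polynomial_alt poly_a n
instance (poly_a : List Int) (n : Int) (out : List Int) : Decidable (Spec_create_series_from_polynomial poly_a n out) := by unfold Spec_create_series_from_polynomial; infer_instance

-- ===== CLAIM (what is proved, stated in full; the proofs are below) =====
def Claim_equal_create_series_from_polynomial : Prop := ∀ (poly_a : List Int) (n : Int), Dom_create_series_from_polynomial poly_a n → Spec_create_series_from_polynomial poly_a n (create_series_from_polynomial poly_a n)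

-- ===== LEMMAS AND PROOFS =====

-- A's inner pair-fold computes a Horner evaluation (generalized over the start state).
theorem pv_inner_horner (i : Int) : ∀ (l : List Int) (s p : Int),
    (l.foldl (fun (st : Int × Int) c => (st.1 + st.2 * c, st.2 * i)) (s, p)).1
      = s + p * l.foldr (fun c acc => acc * i + c) 0 := by
  intro l
  induction l with
  | nil => intro s p; simp
  | cons c t ih =>
    intro s p
    simp only [List.foldl_cons, List.foldr_cons, ih]
    ring

theorem pv_foldl_append_map {α β : Type} (f : α → β) :
    ∀ (L : List α) (acc : List β),
      L.foldl (fun a i => a ++ [f i]) acc = acc ++ L.map f := by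
  intro L
  induction L with
  | nil => intro acc; simp
  | cons x t ih => intro acc; simp [ih]

-- ===== VERDICT (by name: the statement is the Claim_ definition above) =====
theorem create_series_from_polynomial_spec : Claim_equal_create_series_from_polynomial := by
  intro poly_a n _
  unfold Spec_create_series_from_polynomial create_series_from_polynomial
    create_series_from_polynomial_alt
  rw [pv_foldl_append_map]
  simp only [List.nil_append]
  apply List.map_congr_left
  intro i _
  rw [pv_inner_horner]
  unfold pvHorner
  rw [List.foldl_reverse]
  ring
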